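-- pv_equiv track=rewrite | github.com/jainvarun047/practice | logic_practice/merge_logic/VersionReconciliation.py | reconcile_versions
-- ===== SOURCE A (Python) =====
-- def reconcile_versions(records):
--     rec_map = {}
--
--     for rec in records:
--         rec_id = rec['id']
--
--         if rec_id not in rec_map:
--             rec_map[rec_id] = rec
--         else:
--             # Optional
--             # if (rec_map[rec_id]['version'], rec_map[rec_id]['timestamp'])
--             #  < (rec['version'], rec['timestamp']):
--             #     rec_map[rec_id] = rec
--
--             rec_ver = rec['version']
--             if rec_map[rec_id]['version'] < rec_ver:
--                 rec_map[rec_id] = rec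
--             elif rec_map[rec_id]['version'] == rec_ver:
--                 rec_ts = rec['timestamp']
--                 if rec_map[rec_id]['timestamp'] < rec_ts:
--                     rec_map[rec_id] = rec
--
--     return list(rec_map.values())
-- ===== SOURCE B (Python) =====
-- def reconcile_versions(records):
--     # build-index-then-reduce: group records by id, then pick each group's winner
--     # (absent version/timestamp fields rank as 0; they never decide on well-formed data)
--     groups = {}
--     for rec in records:
--         rid = rec['id']
--         groups[rid] = groups.get(rid, []) + [rec]
--     return [max(g, key=lambda r: (r.get('version', 0), r.get('timestamp', 0)))
--             for g in groups.values()]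
-- ===== Notes on version B (the rewrite author's own statement) =====
-- stated objective: alternative
-- what changed: A keeps the best record per id in one keep-best pass with nested field comparisons; B first builds an id->group index (grouping pass) and then reduces each group with max keyed by the (version, timestamp) tuple (missing fields defaulting to 0), in first-seen id order.
import Mathlib
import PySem

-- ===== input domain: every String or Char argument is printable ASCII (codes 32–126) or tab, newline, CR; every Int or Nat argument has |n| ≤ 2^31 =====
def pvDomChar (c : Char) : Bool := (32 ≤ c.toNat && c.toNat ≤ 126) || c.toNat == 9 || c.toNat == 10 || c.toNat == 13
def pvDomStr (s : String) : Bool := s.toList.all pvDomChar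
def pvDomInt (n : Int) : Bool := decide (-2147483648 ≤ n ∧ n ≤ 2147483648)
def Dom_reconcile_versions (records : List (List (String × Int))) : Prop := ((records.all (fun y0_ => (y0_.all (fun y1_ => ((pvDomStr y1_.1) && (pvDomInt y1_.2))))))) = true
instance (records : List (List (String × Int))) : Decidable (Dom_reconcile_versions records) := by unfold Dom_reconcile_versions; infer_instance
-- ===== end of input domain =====

-- B groups records by id and then reduces each group with a tuple-keyed max, instead of A's
-- single keep-best pass; same cost, different decomposition (return value only; no mutation).

-- rec[k] / rec.get(k, 0) for a record dict (first match; the 0 default is only reachable where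
-- the Python side never compares on it, see Pre_)
def fget (rec : List (String × Int)) (k : String) : Int :=
  ((rec.find? (fun p => p.1 == k)).map (·.2)).getD 0

-- ===== PORT A =====
def aStep (m : PySem.Dict Int (List (String × Int))) (rec : List (String × Int)) :
    PySem.Dict Int (List (String × Int)) :=
  let rid := fget rec "id"
  match m.get? rid with
  | none => m.insert rid rec
  | some cur =>
    let rv := fget rec "version"
    if fget cur "version" < rv then m.insert rid rec
    else if fget cur "version" = rv then
      (if fget cur "timestamp" < fget rec "timestamp" then m.insert rid rec else m)
    else m

def reconcile_versions (records : List (List (String × Int))) : List (List (String × Int)) :=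
  (records.foldl aStep PySem.Dict.empty).values

-- ===== PORT B =====
def recKey (r : List (String × Int)) : Int × Int := (fget r "version", fget r "timestamp")

-- Python tuple '<' on (Int, Int)
def keyLt (a b : Int × Int) : Bool := a.1 < b.1 || (a.1 == b.1 && a.2 < b.2)

-- max(g, key=recKey): first maximal element ([] unreachable: groups are nonempty)
def maxByKey (g : List (List (String × Int))) : List (String × Int) :=
  match g with
  | [] => []
  | x :: xs => xs.foldl (fun best r => if keyLt (recKey best) (recKey r) then r else best) x

def bStep (d : PySem.Dict Int (List (List (String × Int)))) (rec : List (String × Int)) :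
    PySem.Dict Int (List (List (String × Int))) :=
  let rid := fget rec "id"
  d.insert rid (d.getD rid [] ++ [rec])

def reconcile_versions_alt (records : List (List (String × Int))) : List (List (String × Int)) :=
  ((records.foldl bStep PySem.Dict.empty).values).map maxByKey

-- ===== PRECONDITION & SPEC =====
-- Pre_ excludes records missing an 'id' field (A raises KeyError), duplicate-id records missing
-- 'version', and duplicated (id, version) records missing 'timestamp' (A reads those fields
-- lazily there and, depending on the values, raises KeyError or returns a value that hinges on
-- which fields it happened to read).
def Pre_reconcile_versions (records : List (List (String × Int))) : Prop :=
  (records.all (fun rec => rec.any (fun p => p.1 == "id") &&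
      (records.countP (fun r => fget r "id" == fget rec "id") ≤ 1 ||
        (rec.any (fun p => p.1 == "version") &&
          (records.countP (fun r => fget r "id" == fget rec "id" &&
              fget r "version" == fget rec "version") ≤ 1 ||
            rec.any (fun p => p.1 == "timestamp")))))) = true
instance (records : List (List (String × Int))) : Decidable (Pre_reconcile_versions records) := by
  unfold Pre_reconcile_versions; infer_instance

def pvWitness_reconcile_versions : (List (List (String × Int))) :=
  [[("id", 1), ("version", 2), ("timestamp", 5)], [("id", 1), ("version", 2), ("timestamp", 7)]]

def Spec_reconcile_versions (records : List (List (String × Int))) (out : List (List (String × Int))) : Prop := out = reconcile_versions_alt records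
instance (records : List (List (String × Int))) (out : List (List (String × Int))) : Decidable (Spec_reconcile_versions records out) := by unfold Spec_reconcile_versions; infer_instance

-- ===== CLAIM (what is proved, stated in full; the proofs are below) =====
def Claim_equal_reconcile_versions : Prop := ∀ (records : List (List (String × Int))), Dom_reconcile_versions records → Pre_reconcile_versions records → Spec_reconcile_versions records (reconcile_versions records)

-- ===== LEMMAS AND PROOFS =====

-- image of one B-entry under "reduce the group"
def redEntry (p : Int × List (List (String × Int))) : Int × List (String × Int) :=
  (p.1, maxByKey p.2)

-- the invariant linking A's map to B's grouping dict
def InvAB (m : PySem.Dict Int (List (String × Int)))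
    (g : PySem.Dict Int (List (List (String × Int)))) : Prop :=
  m.items = g.items.map redEntry ∧ (∀ p ∈ g.items, p.2 ≠ []) ∧ g.keys.Nodup

lemma keys_eq_of_inv (m : PySem.Dict Int (List (String × Int)))
    (g : PySem.Dict Int (List (List (String × Int)))) (h : InvAB m g) : m.keys = g.keys := by
  simp only [PySem.Dict.keys, h.1, List.map_map]
  exact List.map_congr_left (fun p _ => rfl)

lemma maxByKey_append (grp : List (List (String × Int))) (hne : grp ≠ [])
    (rec : List (String × Int)) :
    maxByKey (grp ++ [rec]) =
      if keyLt (recKey (maxByKey grp)) (recKey rec) then rec else maxByKey grp := by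
  match grp with
  | [] => exact absurd rfl hne
  | x :: xs => simp [maxByKey, List.foldl_append]

lemma inv_step (m : PySem.Dict Int (List (String × Int)))
    (g : PySem.Dict Int (List (List (String × Int)))) (rec : List (String × Int))
    (h : InvAB m g) : InvAB (aStep m rec) (bStep g rec) := by
  obtain ⟨hitems, hne, hnd⟩ := h
  have hmk : m.keys = g.keys := keys_eq_of_inv m g ⟨hitems, hne, hnd⟩
  have hmnd : m.keys.Nodup := hmk ▸ hnd
  set rid := fget rec "id" with hrid
  by_cases hc : rid ∈ g.keys
  · -- existing key: A updates (or not), B appends to the group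
    obtain ⟨grp, hget⟩ : ∃ grp, g.get? rid = some grp := by
      rcases hg : g.get? rid with _ | grp
      · exact absurd ((PySem.Dict.get?_eq_none_iff_not_mem_keys _ _).1 hg) (not_not_intro hc)
      · exact ⟨grp, rfl⟩
    have hmem : (rid, grp) ∈ g.items := PySem.Dict.mem_items_of_get?_eq_some _ hget
    have hgrpne : grp ≠ [] := hne _ hmem
    have hmmem : (rid, maxByKey grp) ∈ m.items := by
      rw [hitems]; exact List.mem_map_of_mem hmem
    have hmget : m.get? rid = some (maxByKey grp) :=
      PySem.Dict.get?_of_mem_items _ hmmem hmnd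
    have hgc : g.contains rid = true := by
      rw [PySem.Dict.contains_eq_isSome_get?, hget]; rfl
    have hmc : m.contains rid = true := by
      rw [PySem.Dict.contains_eq_isSome_get?, hmget]; rfl
    have hgd : g.getD rid [] = grp := PySem.Dict.getD_of_get?_eq_some _ _ hget
    -- the A step collapses to one tuple comparison against the group's current best
    have hA : aStep m rec =
        (if keyLt (recKey (maxByKey grp)) (recKey rec) then m.insert rid rec else m) := by
      simp only [aStep, ← hrid, hmget, keyLt, recKey]
      split_ifs with h1 h2 h3 h4 h5 <;> simp_all <;> omega
    have hBitems : (bStep g rec).items =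
        g.items.map (fun p => if p.1 == rid then (rid, grp ++ [rec]) else p) := by
      simp only [bStep, ← hrid, hgd]
      exact PySem.Dict.items_insert_of_contains _ _ hgc
    have huniq : ∀ p ∈ g.items, p.1 = rid → p = (rid, grp) := by
      intro p hp hpk
      have := PySem.Dict.get?_of_mem_items _ hp hnd
      rw [hpk, hget] at this
      cases p; cases this; simp_all
    refine ⟨?_, ?_, ?_⟩
    · rw [hA, hBitems, List.map_map]
      by_cases hk : keyLt (recKey (maxByKey grp)) (recKey rec)
      · rw [if_pos hk, PySem.Dict.items_insert_of_contains _ _ hmc, hitems, List.map_map]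
        apply List.map_congr_left
        intro p hp
        by_cases hpk : p.1 = rid
        · have := huniq p hp hpk
          subst this
          simp [redEntry, maxByKey_append grp hgrpne rec, hk]
        · simp [redEntry, Function.comp, hpk]
      · rw [if_neg hk, hitems]
        apply List.map_congr_left
        intro p hp
        by_cases hpk : p.1 = rid
        · have := huniq p hp hpk
          subst this
          simp [redEntry, maxByKey_append grp hgrpne rec, hk]
        · simp [redEntry, Function.comp, hpk]
    · intro p hp
      rw [hBitems] at hp
      obtain ⟨q, hq, hqe⟩ := List.mem_map.1 hp
      by_cases hqk : q.1 = rid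
      · simp only [hqk, BEq.rfl, if_pos] at hqe
        subst hqe; simp
      · simp only [beq_eq_false_iff_ne.2 hqk] at hqe
        simp at hqe
        exact hqe ▸ hne q hq
    · have : (bStep g rec).keys = g.keys := by
        simp only [bStep, ← hrid]
        exact PySem.Dict.keys_insert_of_contains _ _ hgc
      rw [this]; exact hnd
  · -- fresh key: both sides append an entry
    have hgn : g.get? rid = none := (PySem.Dict.get?_eq_none_iff_not_mem_keys _ _).2 hc
    have hmn : m.get? rid = none :=
      (PySem.Dict.get?_eq_none_iff_not_mem_keys _ _).2 (hmk ▸ hc)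
    have hgc : g.contains rid = false := by
      rw [PySem.Dict.contains_eq_isSome_get?, hgn]; rfl
    have hmc : m.contains rid = false := by
      rw [PySem.Dict.contains_eq_isSome_get?, hmn]; rfl
    have hgd : g.getD rid [] = [] := PySem.Dict.getD_of_not_contains _ _ hgc
    refine ⟨?_, ?_, ?_⟩
    · simp only [aStep, bStep, ← hrid, hmn, hgd, List.nil_append,
        PySem.Dict.items_insert_of_not_contains _ _ hmc,
        PySem.Dict.items_insert_of_not_contains _ _ hgc]
      simp [hitems, redEntry, maxByKey]
    · intro p hp
      simp only [bStep, ← hrid, hgd, List.nil_append] at hp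
      rw [PySem.Dict.items_insert_of_not_contains _ _ hgc] at hp
      rcases List.mem_append.1 hp with h' | h'
      · exact hne p h'
      · simp at h'; subst h'; simp
    · simp only [bStep, ← hrid]
      rw [PySem.Dict.keys_insert_of_not_contains _ _ hgc]
      rw [List.nodup_append]
      refine ⟨hnd, List.nodup_singleton _, ?_⟩
      intro a ha b hb
      simp only [List.mem_singleton] at hb
      subst hb; exact fun h => hc (h ▸ ha)

lemma inv_foldl (records : List (List (String × Int)))
    (m : PySem.Dict Int (List (String × Int)))
    (g : PySem.Dict Int (List (List (String × Int)))) (h : InvAB m g) :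
    InvAB (records.foldl aStep m) (records.foldl bStep g) := by
  induction records generalizing m g with
  | nil => exact h
  | cons rec rs ih => exact ih _ _ (inv_step m g rec h)

-- ===== VERDICT (by name: the statement is the Claim_ definition above) =====
theorem reconcile_versions_spec : Claim_equal_reconcile_versions := by
  intro records _ _
  have h := inv_foldl records PySem.Dict.empty PySem.Dict.empty
    ⟨by rfl, by intro p hp; simp [PySem.Dict.empty] at hp, by simp⟩
  show reconcile_versions records = reconcile_versions_alt records
  simp only [reconcile_versions, reconcile_versions_alt, PySem.Dict.values, h.1, List.map_map]
  rfl
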